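-- pv_equiv track=rewrite | github.com/danielquinti/temporal-asp-blocks-world | parser.py | facts
-- ===== SOURCE A (Python) =====
-- def facts(towers,goal,num_blocks):
-- 	aux=""
-- 	if goal:
-- 		for tower in towers:
-- 			i=0
-- 			tower=tower.split(' ')[:-1]
-- 			for number in tower:
-- 				if i==0:
-- 					aux+="g("+number+','+str(i)+').\n'
-- 				else:
-- 					aux+="g("+number+','+str(tower[i-1])+').\n'
-- 				i+=1
-- 	else:
-- 		aux+="#program initial. % At timepoint t=0\n"
-- 		for tower in towers:
-- 			i=0
-- 			tower=tower.split(' ')[:-1]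
-- 			for number in tower:
-- 				if i==0:
-- 					aux+="on("+number+','+str(i)+').\n'
-- 				else:
-- 					aux+="on("+number+','+str(tower[i-1])+').\n'
-- 				i+=1
-- 	return aux
-- ===== SOURCE B (Python) =====
-- def facts(towers, goal, num_blocks):
--     name = 'g' if goal else 'on'
--
--     def emit(blocks, prev):
--         # recursion on the tower, carrying the previous block as the support
--         if not blocks:
--             return ''
--         return f"{name}({blocks[0]},{prev}).\n" + emit(blocks[1:], blocks[0])
--
--     body = ''.join(emit(t.split(' ')[:-1], '0') for t in towers)
--     return body if goal else "#program initial. % At timepoint t=0\n" + body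
-- ===== Notes on version B (the rewrite author's own statement) =====
-- stated objective: alternative
-- what changed: B replaces A's index counter with its i==0 branch and tower[i-1] back-lookup by a recursive per-tower emitter that threads the previous block through as an accumulator (prev starts at '0'), mapping it over the towers and joining once.
import Mathlib
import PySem

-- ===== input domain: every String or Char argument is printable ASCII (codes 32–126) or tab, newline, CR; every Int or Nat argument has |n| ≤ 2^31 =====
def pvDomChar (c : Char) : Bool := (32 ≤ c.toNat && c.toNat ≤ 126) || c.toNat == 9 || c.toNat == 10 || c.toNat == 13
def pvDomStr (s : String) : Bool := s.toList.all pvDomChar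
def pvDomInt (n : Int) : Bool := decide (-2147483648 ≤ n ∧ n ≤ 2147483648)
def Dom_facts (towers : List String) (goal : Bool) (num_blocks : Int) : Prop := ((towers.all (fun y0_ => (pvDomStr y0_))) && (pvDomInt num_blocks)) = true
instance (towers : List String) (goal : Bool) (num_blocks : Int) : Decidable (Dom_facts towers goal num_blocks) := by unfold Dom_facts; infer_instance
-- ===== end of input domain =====

-- B replaces A's index counter (i==0 branch, tower[i-1] back-lookup) by a recursive per-tower
-- emitter carrying the previous block as the support accumulator; same cost, different decomposition.

-- ===== PORT A =====
-- tower.split(' ') has a nonempty separator, so split? is always `some`; `.getD []` is unreachable.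
-- tower[i-1] is only evaluated when 1 ≤ i < len(tower), so pyGet? is always `some`; `.getD ""` is unreachable.
def facts (towers : List String) (goal : Bool) (num_blocks : Int) : String :=
  if goal then
    towers.foldl (fun aux tower =>
      let t := PySem.List.slice ((PySem.Str.split? tower " ").getD []) none (some (-1))
      (t.foldl (fun (st : String × Int) number =>
        (if st.2 == 0 then st.1 ++ "g(" ++ number ++ "," ++ PySem.Int.toStr st.2 ++ ").\n"
         else st.1 ++ "g(" ++ number ++ "," ++ (PySem.List.pyGet? t (st.2 - 1)).getD "" ++ ").\n",
         st.2 + 1)) (aux, 0)).1) ""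
  else
    towers.foldl (fun aux tower =>
      let t := PySem.List.slice ((PySem.Str.split? tower " ").getD []) none (some (-1))
      (t.foldl (fun (st : String × Int) number =>
        (if st.2 == 0 then st.1 ++ "on(" ++ number ++ "," ++ PySem.Int.toStr st.2 ++ ").\n"
         else st.1 ++ "on(" ++ number ++ "," ++ (PySem.List.pyGet? t (st.2 - 1)).getD "" ++ ").\n",
         st.2 + 1)) (aux, 0)).1) "#program initial. % At timepoint t=0\n"

-- ===== PORT B =====
-- Source B's recursive emit(blocks, prev)
def pvEmit (name : String) : List String → String → String
  | [], _ => ""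
  | b :: rest, prev => name ++ "(" ++ b ++ "," ++ prev ++ ").\n" ++ pvEmit name rest b

def facts_alt (towers : List String) (goal : Bool) (num_blocks : Int) : String :=
  let name := if goal then "g" else "on"
  let body := PySem.Str.join ""
    (towers.map (fun t =>
      pvEmit name (PySem.List.slice ((PySem.Str.split? t " ").getD []) none (some (-1))) "0"))
  if goal then body else "#program initial. % At timepoint t=0\n" ++ body

-- ===== PRECONDITION & SPEC =====
def Spec_facts (towers : List String) (goal : Bool) (num_blocks : Int) (out : String) : Prop := out = facts_alt towers goal num_blocks
instance (towers : List String) (goal : Bool) (num_blocks : Int) (out : String) : Decidable (Spec_facts towers goal num_blocks out) := by unfold Spec_facts; infer_instance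

-- ===== CLAIM =====
def Claim_equal_facts : Prop := ∀ (towers : List String) (goal : Bool) (num_blocks : Int), Dom_facts towers goal num_blocks → Spec_facts towers goal num_blocks (facts towers goal num_blocks)

-- ===== LEMMAS AND PROOFS =====

theorem pvIntersperse_nil_flatten (l : List (List Char)) : (List.intersperse [] l).flatten = l.flatten := by
  induction l with
  | nil => simp
  | cons x xs ih =>
    cases xs with
    | nil => simp
    | cons y ys => simp [List.intersperse] at *; simpa using ih

theorem pvJoin_nil : PySem.Str.join "" [] = "" := by decide

theorem pvJoin_cons (x : String) (xs : List String) :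
    PySem.Str.join "" (x :: xs) = x ++ PySem.Str.join "" xs := by
  simp [PySem.Str.join, PySem.Chars.join, List.intercalate, pvIntersperse_nil_flatten,
    String.ofList_append]

-- A's inner loop, started at counter k on the suffix t.drop k, appends exactly what
-- B's recursive emitter produces when its prev-accumulator holds the block before index k.
theorem pvInnerA (name : String) :
    ∀ (s t : List String) (k : Nat) (aux prev : String), t.drop k = s →
    prev = (if k = 0 then "0" else t.getD (k - 1) "") →
    (s.foldl (fun (st : String × Int) number =>
        (if st.2 == 0 then st.1 ++ (name ++ "(") ++ number ++ "," ++ PySem.Int.toStr st.2 ++ ").\n"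
         else st.1 ++ (name ++ "(") ++ number ++ "," ++ (PySem.List.pyGet? t (st.2 - 1)).getD "" ++ ").\n",
         st.2 + 1)) (aux, (k : Int))).1
      = aux ++ pvEmit name s prev := by
  intro s
  induction s with
  | nil => intro t k aux prev h hp; simp [pvEmit]
  | cons b s' ih =>
    intro t k aux prev h hp
    have hb : t[k]? = some b := by
      have h0 : (t.drop k)[0]? = some b := by rw [h]; rfl
      simpa using h0
    have hdrop : t.drop (k + 1) = s' := by
      have : (t.drop k).drop 1 = s' := by rw [h]; rfl
      simpa [List.drop_drop] using this
    have hstep :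
        (if ((k : Int)) == 0 then aux ++ (name ++ "(") ++ b ++ "," ++ PySem.Int.toStr (k : Int) ++ ").\n"
         else aux ++ (name ++ "(") ++ b ++ "," ++ (PySem.List.pyGet? t ((k : Int) - 1)).getD "" ++ ").\n")
          = aux ++ (name ++ "(" ++ b ++ "," ++ prev ++ ").\n") := by
      have h0s : PySem.Int.toStr (0 : Int) = "0" := by decide
      by_cases hk : k = 0
      · subst hk
        simp [hp, h0s, String.append_assoc]
      · have hne : ¬ ((k : Int) == 0) := by simp [hk]
        have hcast : (k : Int) - 1 = ((k - 1 : Nat) : Int) := by omega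
        simp [hne, hp, hk, hcast, PySem.List.pyGet?_natCast, List.getD, String.append_assoc]
    have hprev' : b = (if k + 1 = 0 then "0" else t.getD (k + 1 - 1) "") := by
      simp [List.getD, hb]
    have hrec := ih t (k + 1) (aux ++ (name ++ "(" ++ b ++ "," ++ prev ++ ").\n")) b hdrop hprev'
    simp only [List.foldl_cons, hstep]
    have hk1 : (k : Int) + 1 = ((k + 1 : Nat) : Int) := by omega
    rw [hk1, hrec, pvEmit, String.append_assoc]

-- the two top-level passes agree: A's fold over towers = acc ++ join of B's mapped emits
theorem pvMain (name : String) :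
    ∀ (towers : List String) (acc : String),
    towers.foldl (fun aux tower =>
      let t := PySem.List.slice ((PySem.Str.split? tower " ").getD []) none (some (-1))
      (t.foldl (fun (st : String × Int) number =>
        (if st.2 == 0 then st.1 ++ (name ++ "(") ++ number ++ "," ++ PySem.Int.toStr st.2 ++ ").\n"
         else st.1 ++ (name ++ "(") ++ number ++ "," ++ (PySem.List.pyGet? t (st.2 - 1)).getD "" ++ ").\n",
         st.2 + 1)) (aux, 0)).1) acc
      = acc ++ PySem.Str.join "" (towers.map (fun tw =>
          pvEmit name (PySem.List.slice ((PySem.Str.split? tw " ").getD []) none (some (-1))) "0")) := by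
  intro towers
  induction towers with
  | nil => intro acc; simp [pvJoin_nil]
  | cons tw rest ih =>
    intro acc
    rw [List.foldl_cons, List.map_cons, pvJoin_cons]
    set t := PySem.List.slice ((PySem.Str.split? tw " ").getD []) none (some (-1)) with ht
    have hin := pvInnerA name t t 0 acc "0" rfl (by simp)
    simp only [Nat.cast_zero] at hin
    simp only [ht] at hin ⊢
    rw [hin, ih, String.append_assoc]

-- ===== VERDICT =====
theorem facts_spec : Claim_equal_facts := by
  intro towers goal num_blocks _
  unfold Spec_facts facts facts_alt
  cases goal with
  | true =>
    simp only [if_true, show ("g(" : String) = "g" ++ "(" from rfl]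
    rw [pvMain "g" towers ""]
    rfl
  | false =>
    simp only [Bool.false_eq_true, if_false, show ("on(" : String) = "on" ++ "(" from rfl]
    rw [pvMain "on" towers "#program initial. % At timepoint t=0\n"]
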